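-- pv_equiv track=rewrite | github.com/IPMD2025/MAPL | dataset/LTCC.py | reassignAttrlabel
-- ===== SOURCE A (Python) =====
-- def reassignAttrlabel(pids,attribute):
--
--         attr_container =[]
--         for i in range(35):
--             attr_container.append(set())
--
--         for i in range(len(pids)):
--             pid = pids[i]
--             # clothes_id = pattern2.search(osp.basename(img_path)).group(1)
--             attr=attribute[i]
--             if -1 in attr: continue
--             for j in range(len(attr)):
--                 att = str(pid) + str(attr[j])
--                 attr_container[j].add(att)
--
--         attr2label =[]
--         for i in range(len(attr_container)):
--             attr_container[i] = sorted(attr_container[i])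
--             attr2label.append( {attr_id:label for label, attr_id in enumerate(attr_container[i])})
--
--         return attr2label
-- ===== SOURCE B (Python) =====
-- def reassignAttrlabel(pids, attribute):
--     # Column-major re-implementation: keep valid (pid, attr) rows once, then
--     # for each of the 35 attribute columns collect, sort and label the strings.
--     valid = [(pid, attr) for pid, attr in zip(pids, attribute) if -1 not in attr]
--     attr2label = []
--     for j in range(35):
--         column = sorted({str(pid) + str(attr[j]) for pid, attr in valid if j < len(attr)})
--         attr2label.append({a: l for l, a in enumerate(column)})
--     return attr2label
-- ===== Notes on version B (the rewrite author's own statement) =====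
-- stated objective: alternative
-- what changed: Row-major single pass filling 35 mutable sets is replaced by a column-major decomposition: valid rows are selected once, then each of the 35 label columns is built independently by a set comprehension over those rows.
import Mathlib
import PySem

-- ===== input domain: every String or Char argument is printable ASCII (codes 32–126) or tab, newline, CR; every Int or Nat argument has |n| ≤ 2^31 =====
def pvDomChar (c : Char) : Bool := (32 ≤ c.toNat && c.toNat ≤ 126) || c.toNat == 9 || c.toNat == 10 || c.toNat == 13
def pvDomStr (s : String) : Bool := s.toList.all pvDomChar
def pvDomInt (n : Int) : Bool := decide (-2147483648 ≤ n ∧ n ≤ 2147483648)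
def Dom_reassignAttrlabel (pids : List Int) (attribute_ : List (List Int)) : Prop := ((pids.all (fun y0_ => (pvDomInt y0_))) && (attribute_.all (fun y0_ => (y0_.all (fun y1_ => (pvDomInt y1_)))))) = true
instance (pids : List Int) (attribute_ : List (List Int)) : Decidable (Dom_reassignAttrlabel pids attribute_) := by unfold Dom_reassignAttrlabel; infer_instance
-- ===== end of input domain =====

-- B is a column-major re-decomposition of A's row-major pass; return values proved equal, no mutation visible to the caller.

-- ===== PORT A =====
-- Note: the Python statement 'attr_container[i] = sorted(attr_container[i])' is read back
-- only inside the same iteration (each index i is visited exactly once), so the port reads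
-- sorted(attr_container[i]) directly without storing it back; exact for the return value.
def reassignAttrlabel (pids : List Int) (attribute_ : List (List Int)) : List (List (String × Int)) :=
  let attr_container : List (PySem.Set String) :=
    (PySem.List.pyRange 0 35 1).foldl (fun acc _ => acc ++ [PySem.Set.empty]) []
  let attr_container :=
    (PySem.List.pyRange 0 (pids.length : Int) 1).foldl (fun cont i =>
      let pid := PySem.List.pyGetD pids i 0
      let attr := PySem.List.pyGetD attribute_ i []
      if attr.contains (-1) then cont
      else
        (PySem.List.pyRange 0 (attr.length : Int) 1).foldl (fun cont j =>
          let att := PySem.Int.toStr pid ++ PySem.Int.toStr (PySem.List.pyGetD attr j 0)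
          PySem.List.pySetD cont j (PySem.Set.add (PySem.List.pyGetD cont j PySem.Set.empty) att)) cont)
      attr_container
  (PySem.List.pyRange 0 (attr_container.length : Int) 1).foldl (fun acc i =>
    let s := PySem.List.sorted (PySem.List.pyGetD attr_container i PySem.Set.empty) (fun x => x) false
    acc ++ [((PySem.List.enumerate s 0).foldl (fun d p => PySem.Dict.insert d p.2 p.1) PySem.Dict.empty).items]) []

-- ===== PORT B =====
def reassignAttrlabel_alt (pids : List Int) (attribute_ : List (List Int)) : List (List (String × Int)) :=
  let valid := (pids.zip attribute_).filter (fun pa => !pa.2.contains (-1))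
  (PySem.List.pyRange 0 35 1).foldl (fun acc j =>
    let column := PySem.List.sorted
      (PySem.Set.ofList ((valid.filter (fun pa => decide (j < (pa.2.length : Int)))).map
        (fun pa => PySem.Int.toStr pa.1 ++ PySem.Int.toStr (PySem.List.pyGetD pa.2 j 0))))
      (fun x => x) false
    acc ++ [((PySem.List.enumerate column 0).foldl (fun d p => PySem.Dict.insert d p.2 p.1) PySem.Dict.empty).items]) []

-- ===== PRECONDITION & SPEC =====
-- Pre_ excludes exactly the inputs where the Python A raises IndexError: fewer attribute rows
-- than pids, or a row without -1 longer than the 35 containers.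
def Pre_reassignAttrlabel (pids : List Int) (attribute_ : List (List Int)) : Prop :=
  pids.length ≤ attribute_.length ∧
  ∀ pa ∈ pids.zip attribute_, pa.2.contains (-1) = true ∨ pa.2.length ≤ 35
instance (pids : List Int) (attribute_ : List (List Int)) : Decidable (Pre_reassignAttrlabel pids attribute_) := by
  unfold Pre_reassignAttrlabel; infer_instance
def pvWitness_reassignAttrlabel : List Int × List (List Int) := ([1, 2], [[3], [4, 5]])
def Spec_reassignAttrlabel (pids : List Int) (attribute_ : List (List Int)) (out : List (List (String × Int))) : Prop := out = reassignAttrlabel_alt pids attribute_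
instance (pids : List Int) (attribute_ : List (List Int)) (out : List (List (String × Int))) : Decidable (Spec_reassignAttrlabel pids attribute_ out) := by unfold Spec_reassignAttrlabel; infer_instance

-- ===== CLAIM (what is proved, stated in full; the proofs are below) =====
def Claim_equal_reassignAttrlabel : Prop := ∀ (pids : List Int) (attribute_ : List (List Int)), Dom_reassignAttrlabel pids attribute_ → Pre_reassignAttrlabel pids attribute_ → Spec_reassignAttrlabel pids attribute_ (reassignAttrlabel pids attribute_)

-- ===== LEMMAS AND PROOFS =====

-- the string added for a row pa in column j
def pvStr (pa : Int × List Int) (j : Nat) : String :=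
  PySem.Int.toStr pa.1 ++ PySem.Int.toStr (pa.2.getD j 0)

-- the column-j collection sequence over a list of rows
def pvCol (rows : List (Int × List Int)) (j : Nat) : List String :=
  (rows.filter (fun pa => !pa.2.contains (-1) && decide (j < pa.2.length))).map (fun pa => pvStr pa j)

-- the per-column post-processing shared by both programs
def pvDict (s : PySem.Set String) : List (String × Int) :=
  ((PySem.List.enumerate (PySem.List.sorted s (fun x => x) false) 0).foldl
    (fun d p => PySem.Dict.insert d p.2 p.1) PySem.Dict.empty).items

-- A's per-row update of the 35 containers
def pvStepRow (cont : List (PySem.Set String)) (pa : Int × List Int) : List (PySem.Set String) :=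
  if pa.2.contains (-1) then cont
  else (PySem.List.pyRange 0 (pa.2.length : Int) 1).foldl (fun cont j =>
    PySem.List.pySetD cont j (PySem.Set.add (PySem.List.pyGetD cont j PySem.Set.empty)
      (PySem.Int.toStr pa.1 ++ PySem.Int.toStr (PySem.List.pyGetD pa.2 j 0)))) cont

-- A's final sorting/labelling loop
def pvFinal (cont : List (PySem.Set String)) : List (List (String × Int)) :=
  (PySem.List.pyRange 0 (cont.length : Int) 1).foldl (fun acc i =>
    acc ++ [((PySem.List.enumerate
        (PySem.List.sorted (PySem.List.pyGetD cont i PySem.Set.empty) (fun x => x) false) 0).foldl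
      (fun d p => PySem.Dict.insert d p.2 p.1) PySem.Dict.empty).items]) []

-- B's per-column item
def pvItem (valid : List (Int × List Int)) (j : Int) : List (String × Int) :=
  ((PySem.List.enumerate (PySem.List.sorted
      (PySem.Set.ofList ((valid.filter (fun pa => decide (j < (pa.2.length : Int)))).map
        (fun pa => PySem.Int.toStr pa.1 ++ PySem.Int.toStr (PySem.List.pyGetD pa.2 j 0))))
      (fun x => x) false) 0).foldl
    (fun d p => PySem.Dict.insert d p.2 p.1) PySem.Dict.empty).items

lemma pv_A_eq (pids : List Int) (attribute_ : List (List Int)) :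
    reassignAttrlabel pids attribute_
      = pvFinal ((PySem.List.pyRange 0 (pids.length : Int) 1).foldl (fun cont i =>
          pvStepRow cont (PySem.List.pyGetD pids i 0, PySem.List.pyGetD attribute_ i []))
          ((PySem.List.pyRange 0 35 1).foldl (fun acc _ => acc ++ [PySem.Set.empty]) [])) := rfl

lemma pv_B_eq (pids : List Int) (attribute_ : List (List Int)) :
    reassignAttrlabel_alt pids attribute_
      = (PySem.List.pyRange 0 35 1).foldl (fun acc j =>
          acc ++ [pvItem ((pids.zip attribute_).filter (fun pa => !pa.2.contains (-1))) j]) [] := rfl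

lemma pv_zipfold {α β σ : Type} (d1 : α) (d2 : β) (g : σ → α × β → σ) :
    ∀ (xs : List α) (ys : List β), xs.length ≤ ys.length → ∀ (init : σ),
    (List.range xs.length).foldl (fun c k => g c (xs.getD k d1, ys.getD k d2)) init
      = (xs.zip ys).foldl g init := by
  intro xs
  induction xs with
  | nil => intro ys _ init; simp
  | cons x xs ih =>
    intro ys h init
    cases ys with
    | nil => simp at h
    | cons y ys =>
      simp only [List.length_cons, List.range_succ_eq_map, List.foldl_cons, List.foldl_map,
        List.getD_cons_zero, List.getD_cons_succ, List.zip_cons_cons]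
      exact ih ys (by simpa using h) (g init (x, y))

lemma pv_outer (pids : List Int) (attribute_ : List (List Int))
    (h : pids.length ≤ attribute_.length) (init : List (PySem.Set String)) :
    (PySem.List.pyRange 0 (pids.length : Int) 1).foldl (fun cont i =>
        pvStepRow cont (PySem.List.pyGetD pids i 0, PySem.List.pyGetD attribute_ i [])) init
      = (pids.zip attribute_).foldl pvStepRow init := by
  rw [PySem.List.pyRange_one, List.foldl_map]
  have h0 : ((pids.length : Int) - 0).toNat = pids.length := by simp
  rw [h0]
  simp only [zero_add, PySem.List.pyGetD_natCast]
  exact pv_zipfold 0 [] pvStepRow pids attribute_ h init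

lemma pv_inner (f : Nat → String) (G : Nat → PySem.Set String) (n : Nat) :
    ∀ (m : Nat), m ≤ n →
    (List.range m).foldl (fun c (k : Nat) => PySem.List.pySetD c (k : Int)
        (PySem.Set.add (PySem.List.pyGetD c (k : Int) PySem.Set.empty) (f k)))
      ((List.range n).map G)
    = (List.range n).map (fun j => if j < m then PySem.Set.add (G j) (f j) else G j) := by
  intro m
  induction m with
  | zero => intro _; simp
  | succ m ih =>
    intro hm
    rw [List.range_succ, List.foldl_append, ih (Nat.le_of_succ_le hm)]
    simp only [List.foldl_cons, List.foldl_nil, PySem.List.pyGetD_natCast, PySem.List.pySetD_natCast]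
    have hmem : ((List.range n).map fun j => if j < m then PySem.Set.add (G j) (f j) else G j).getD m PySem.Set.empty = G m := by
      rw [List.getD_eq_getElem?_getD]
      simp [Nat.lt_of_succ_le hm]
    rw [hmem]
    apply List.ext_getElem
    · simp
    · intro i hi1 hi2
      simp only [List.length_set, List.length_map, List.length_range] at hi1
      rcases Nat.lt_trichotomy i m with h | h | h
      · rw [List.getElem_set_ne (by omega)]
        simp only [List.getElem_map, List.getElem_range]
        rw [if_pos h, if_pos (Nat.lt_succ_of_lt h)]
      · subst h
        rw [List.getElem_set_self (by simpa using hi1)]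
        simp only [List.getElem_map, List.getElem_range]
        rw [if_pos (by omega)]
      · rw [List.getElem_set_ne (by omega)]
        simp only [List.getElem_map, List.getElem_range]
        rw [if_neg (by omega), if_neg (by omega)]

lemma pv_ofList_snoc (xs : List String) (x : String) :
    PySem.Set.ofList (xs ++ [x]) = PySem.Set.add (PySem.Set.ofList xs) x := by
  simp [PySem.Set.ofList_eq_foldl, List.foldl_append]

lemma pv_main :
    ∀ (rows : List (Int × List Int)),
    (∀ pa ∈ rows, pa.2.contains (-1) = true ∨ pa.2.length ≤ 35) →
    ∀ (P : Nat → List String),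
    rows.foldl pvStepRow ((List.range 35).map (fun j => PySem.Set.ofList (P j)))
    = (List.range 35).map (fun j => PySem.Set.ofList (P j ++ pvCol rows j)) := by
  intro rows
  induction rows with
  | nil => intro _ P; simp [pvCol]
  | cons r rest ih =>
    intro h P
    simp only [List.foldl_cons]
    by_cases hr : r.2.contains (-1)
    · have hstep : pvStepRow ((List.range 35).map (fun j => PySem.Set.ofList (P j))) r
          = (List.range 35).map (fun j => PySem.Set.ofList (P j)) := by
        unfold pvStepRow; rw [if_pos hr]
      rw [hstep, ih (fun pa hpa => h pa (List.mem_cons_of_mem r hpa)) P]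
      have hcol : ∀ j, pvCol (r :: rest) j = pvCol rest j := by
        intro j
        have hc : (!r.2.contains (-1) && decide (j < r.2.length)) = false := by rw [hr]; rfl
        simp only [pvCol, List.filter_cons, hc]
        simp
      simp only [hcol]
    · have hlen : r.2.length ≤ 35 := by
        rcases h r (List.mem_cons_self) with h' | h'
        · exact absurd h' hr
        · exact h'
      have hc0 : r.2.contains (-1) = false := by
        cases hb : r.2.contains (-1) with
        | false => rfl
        | true => exact absurd hb hr
      have hconv : pvStepRow ((List.range 35).map (fun j => PySem.Set.ofList (P j))) r
          = (List.range 35).map (fun j => if j < r.2.length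
              then PySem.Set.add (PySem.Set.ofList (P j)) (pvStr r j) else PySem.Set.ofList (P j)) := by
        unfold pvStepRow
        rw [if_neg hr, PySem.List.pyRange_one, List.foldl_map]
        have h0 : ((r.2.length : Int) - 0).toNat = r.2.length := by simp
        rw [h0]
        have := pv_inner (fun k => pvStr r k) (fun j => PySem.Set.ofList (P j)) 35 r.2.length hlen
        simpa [pvStr, PySem.List.pyGetD_natCast] using this
      rw [hconv]
      have hstep : (List.range 35).map (fun j => if j < r.2.length
            then PySem.Set.add (PySem.Set.ofList (P j)) (pvStr r j) else PySem.Set.ofList (P j))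
          = (List.range 35).map (fun j =>
              PySem.Set.ofList (P j ++ (if j < r.2.length then [pvStr r j] else []))) := by
        apply List.map_congr_left
        intro j _
        split_ifs with hj
        · rw [pv_ofList_snoc]
        · simp
      rw [hstep, ih (fun pa hpa => h pa (List.mem_cons_of_mem r hpa))]
      apply List.map_congr_left
      intro j _
      have hcol : pvCol (r :: rest) j = (if j < r.2.length then [pvStr r j] else []) ++ pvCol rest j := by
        have hc : (!r.2.contains (-1) && decide (j < r.2.length)) = decide (j < r.2.length) := by
          rw [hc0]; simp
        simp only [pvCol, List.filter_cons, hc]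
        by_cases hj : j < r.2.length
        · simp [hj]
        · simp [hj]
      rw [hcol, List.append_assoc]

lemma pv_init :
    ((PySem.List.pyRange 0 35 1).foldl (fun acc _ => acc ++ [PySem.Set.empty]) [] : List (PySem.Set String))
      = (List.range 35).map (fun j => PySem.Set.ofList ([] : List String)) := by
  decide

lemma pv_final_map (F : Nat → PySem.Set String) :
    pvFinal ((List.range 35).map F) = (List.range 35).map (fun k => pvDict (F k)) := by
  unfold pvFinal
  rw [PySem.List.foldl_pyRange_zero_pyGetD' ((List.range 35).map F) PySem.Set.empty
    (fun acc s => acc ++ [((PySem.List.enumerate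
        (PySem.List.sorted s (fun x => x) false) 0).foldl
      (fun d p => PySem.Dict.insert d p.2 p.1) PySem.Dict.empty).items]) []]
  rw [PySem.List.foldl_append_singleton_eq_map]
  simp [List.map_map, pvDict, Function.comp]

lemma pv_A (pids : List Int) (attribute_ : List (List Int))
    (hpre : Pre_reassignAttrlabel pids attribute_) :
    reassignAttrlabel pids attribute_
      = (List.range 35).map (fun k => pvDict (PySem.Set.ofList (pvCol (pids.zip attribute_) k))) := by
  obtain ⟨hlen, hrows⟩ := hpre
  rw [pv_A_eq, pv_init, pv_outer pids attribute_ hlen,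
    pv_main (pids.zip attribute_) hrows (fun _ => [])]
  simp only [List.nil_append]
  exact pv_final_map _

lemma pv_item (rows : List (Int × List Int)) (k : Nat) :
    pvItem (rows.filter (fun pa => !pa.2.contains (-1))) ((0 : Int) + (k : Int))
      = pvDict (PySem.Set.ofList (pvCol rows k)) := by
  unfold pvItem pvDict
  rw [List.filter_filter]
  simp only [zero_add, PySem.List.pyGetD_natCast, Nat.cast_lt]
  have hcomm : ∀ a : Int × List Int,
      (decide (k < a.2.length) && !a.2.contains (-1)) = (!a.2.contains (-1) && decide (k < a.2.length)) :=
    fun a => Bool.and_comm _ _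
  simp only [hcomm]
  rfl

lemma pv_B (pids : List Int) (attribute_ : List (List Int)) :
    reassignAttrlabel_alt pids attribute_
      = (List.range 35).map (fun k => pvDict (PySem.Set.ofList (pvCol (pids.zip attribute_) k))) := by
  rw [pv_B_eq, PySem.List.foldl_append_singleton_eq_map, PySem.List.pyRange_one]
  simp only [List.nil_append, List.map_map]
  apply List.map_congr_left
  intro k _
  exact pv_item (pids.zip attribute_) k

-- ===== VERDICT (by name: the statement is the Claim_ definition above) =====
theorem reassignAttrlabel_spec : Claim_equal_reassignAttrlabel := by
  intro pids attribute_ _ hpre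
  unfold Spec_reassignAttrlabel
  rw [pv_A pids attribute_ hpre, pv_B]
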